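-- pv_equiv track=rewrite | github.com/ma-ji/miscite | server/miscite/routes/dashboard.py | _redact_methodology
-- ===== SOURCE A (Python) =====
-- def _redact_methodology(md: str | None) -> str | None:
--     if not md:
--         return md
--     lines = md.splitlines()
--     out: list[str] = []
--     skip = False
--     for line in lines:
--         header = line.strip().lower()
--         if header.startswith("## data sources used") or header.startswith("## configuration snapshot"):
--             skip = True
--             continue
--         if skip:
--             if header.startswith("## "):
--                 skip = False
--             else:
--                 continue
--         if skip:
--             continue
--         out.append(line)
--     return "\n".join(out).strip() or None
-- ===== SOURCE B (Python) =====
-- def _is_header(line):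
--     return line.strip().lower().startswith("## ")
--
--
-- def _is_redacted(line):
--     h = line.strip().lower()
--     return h.startswith("## data sources used") or h.startswith("## configuration snapshot")
--
--
-- def _redact_methodology(md):
--     if not md:
--         return md
--     lines = md.splitlines()
--     n = len(lines)
--     # preamble: everything before the first '## ' header is always kept
--     i = 0
--     while i < n and not _is_header(lines[i]):
--         i += 1
--     kept = lines[:i]
--     # section by section: drop a whole section when its header is redacted
--     while i < n:
--         j = i + 1
--         while j < n and not _is_header(lines[j]):
--             j += 1
--         if not _is_redacted(lines[i]):
--             kept.extend(lines[i:j])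
--         i = j
--     return "\n".join(kept).strip() or None
-- ===== Notes on version B (the rewrite author's own statement) =====
-- stated objective: alternative
-- what changed: Replaces A's single stateful line loop with a skip flag by a section-based decomposition: split the lines at second-level markdown headers into a preamble plus sections, drop sections whose header is redacted, and concatenate the rest.
import Mathlib
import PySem

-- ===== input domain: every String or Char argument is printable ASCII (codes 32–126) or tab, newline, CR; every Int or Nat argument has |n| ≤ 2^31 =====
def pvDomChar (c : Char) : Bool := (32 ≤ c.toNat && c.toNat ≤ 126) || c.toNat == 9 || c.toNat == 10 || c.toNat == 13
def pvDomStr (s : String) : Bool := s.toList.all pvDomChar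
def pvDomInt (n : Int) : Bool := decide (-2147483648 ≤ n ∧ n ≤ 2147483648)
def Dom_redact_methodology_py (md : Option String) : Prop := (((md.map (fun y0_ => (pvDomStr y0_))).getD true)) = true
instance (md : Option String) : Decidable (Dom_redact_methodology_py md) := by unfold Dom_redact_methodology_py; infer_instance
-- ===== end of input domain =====

-- B replaces A's stateful skip-flag line loop by a section decomposition (preamble + '## '-headed
-- sections, redacted sections dropped whole); alternative structure, same cost.


-- ===== PORT A =====
-- A's loop over lines with the `skip` flag, transliterated as structural recursion on the lines
-- with the accumulator state `skip`.
def pvAGo : List String → Bool → List String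
  | [], _ => []
  | line :: rest, skip =>
    let header := PySem.Str.lower (PySem.Str.strip line)
    if PySem.Str.startswith header "## data sources used" ||
       PySem.Str.startswith header "## configuration snapshot" then
      pvAGo rest true
    else if skip then
      (if PySem.Str.startswith header "## " then line :: pvAGo rest false else pvAGo rest true)
    else
      line :: pvAGo rest false

def redact_methodology_py (md : Option String) : Option String :=
  match md with
  | none => none
  | some s =>
    if s = "" then some s
    else
      let lines := PySem.Str.splitlines s
      let out := pvAGo lines false
      let r := PySem.Str.strip (PySem.Str.join "\n" out)
      if r = "" then none else some r

-- ===== PORT B =====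
-- Source B's helpers _is_header / _is_redacted
def pvIsHeader (line : String) : Bool :=
  PySem.Str.startswith (PySem.Str.lower (PySem.Str.strip line)) "## "

def pvIsRedacted (line : String) : Bool :=
  let h := PySem.Str.lower (PySem.Str.strip line)
  PySem.Str.startswith h "## data sources used" ||
  PySem.Str.startswith h "## configuration snapshot"

-- Source B's outer `while i < n` section loop: the input is header-headed (or empty); the inner
-- `while j` scan for the next header is takeWhile/dropWhile over the non-header body lines.
def pvSections : List String → List String
  | [] => []
  | h :: t =>
    let body := t.takeWhile (fun l => !pvIsHeader l)
    let rest := pvSections (t.dropWhile (fun l => !pvIsHeader l))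
    if pvIsRedacted h then rest else h :: (body ++ rest)
termination_by lines => lines.length
decreasing_by
  have := List.length_dropWhile_le (fun l => !pvIsHeader l) t
  simp; omega

def redact_methodology_py_alt (md : Option String) : Option String :=
  match md with
  | none => none
  | some s =>
    if s = "" then some s
    else
      let lines := PySem.Str.splitlines s
      let pre := lines.takeWhile (fun l => !pvIsHeader l)
      let kept := pre ++ pvSections (lines.dropWhile (fun l => !pvIsHeader l))
      let r := PySem.Str.strip (PySem.Str.join "\n" kept)
      if r = "" then none else some r

-- ===== PRECONDITION & SPEC =====
def Spec_redact_methodology_py (md : Option String) (out : Option String) : Prop := out = redact_methodology_py_alt md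
instance (md : Option String) (out : Option String) : Decidable (Spec_redact_methodology_py md out) := by unfold Spec_redact_methodology_py; infer_instance

-- ===== CLAIM (what is proved, stated in full; the proofs are below) =====
def Claim_equal_redact_methodology_py : Prop := ∀ (md : Option String), Dom_redact_methodology_py md → Spec_redact_methodology_py md (redact_methodology_py md)

-- ===== LEMMAS AND PROOFS =====

-- a redacted header is in particular a '## ' header ("## " is a prefix of both redacted prefixes)
lemma pv_red_imp_hdr (l : String) (h : pvIsRedacted l = true) : pvIsHeader l = true := by
  unfold pvIsRedacted at h
  unfold pvIsHeader
  simp only [PySem.Str.startswith_eq, Bool.or_eq_true] at *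
  rcases h with h | h <;> rw [PySem.Chars.startswith_iff] at h ⊢
  · exact List.IsPrefix.trans (by decide) h
  · exact List.IsPrefix.trans (by decide) h

lemma pv_head_dropWhile (p : String → Bool) (l : List String) (h : l.dropWhile p ≠ []) :
    p ((l.dropWhile p).head h) = false := by
  induction l with
  | nil => simp at h
  | cons a t ih =>
    by_cases hp : p a
    · simp [List.dropWhile, hp] at h ⊢; exact ih _
    · simp [List.dropWhile, hp]

-- the three shapes of one step of A's loop, by the line's kind
lemma pvAGo_cons_red (l : String) (t : List String) (hr : pvIsRedacted l = true) (skip : Bool) :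
    pvAGo (l :: t) skip = pvAGo t true := by
  simp [pvIsRedacted] at hr
  cases skip <;> (simp only [pvAGo]; rcases hr with hr | hr <;> simp [hr])

lemma pvAGo_cons_keep (l : String) (t : List String) (hr : pvIsRedacted l = false)
    (hh : pvIsHeader l = true) (skip : Bool) :
    pvAGo (l :: t) skip = l :: pvAGo t false := by
  simp [pvIsRedacted] at hr
  simp [pvIsHeader] at hh
  obtain ⟨hr1, hr2⟩ := hr
  cases skip <;> simp [pvAGo, hr1, hr2, hh]

lemma pv_not_red_of_not_hdr (l : String) (hh : pvIsHeader l = false) : pvIsRedacted l = false := by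
  by_contra hc
  simp only [Bool.not_eq_false] at hc
  rw [pv_red_imp_hdr l hc] at hh
  exact Bool.noConfusion hh

lemma pvAGo_cons_plain_true (l : String) (t : List String) (hh : pvIsHeader l = false) :
    pvAGo (l :: t) true = pvAGo t true := by
  have hr := pv_not_red_of_not_hdr l hh
  simp [pvIsRedacted] at hr
  simp [pvIsHeader] at hh
  obtain ⟨hr1, hr2⟩ := hr
  simp [pvAGo, hr1, hr2, hh]

lemma pvAGo_cons_plain_false (l : String) (t : List String) (hh : pvIsHeader l = false) :
    pvAGo (l :: t) false = l :: pvAGo t false := by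
  have hr := pv_not_red_of_not_hdr l hh
  simp [pvIsRedacted] at hr
  simp [pvIsHeader] at hh
  obtain ⟨hr1, hr2⟩ := hr
  simp [pvAGo, hr1, hr2]

-- while skip is on, A drops exactly the lines up to the next header
lemma pvAGo_true_drop (lines : List String) :
    pvAGo lines true = pvAGo (lines.dropWhile (fun l => !pvIsHeader l)) true := by
  induction lines with
  | nil => rfl
  | cons a t ih =>
    by_cases hh : pvIsHeader a
    · rw [List.dropWhile_cons]
      simp [hh]
    · have hh' : pvIsHeader a = false := by simpa using hh
      rw [List.dropWhile_cons]
      simp only [hh', Bool.not_false, if_true]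
      rw [pvAGo_cons_plain_true a t hh', ih]

-- while skip is off, A keeps exactly the lines up to the next header
lemma pvAGo_false_split (lines : List String) :
    pvAGo lines false =
      lines.takeWhile (fun l => !pvIsHeader l) ++ pvAGo (lines.dropWhile (fun l => !pvIsHeader l)) false := by
  induction lines with
  | nil => rfl
  | cons a t ih =>
    by_cases hh : pvIsHeader a
    · rw [List.takeWhile_cons, List.dropWhile_cons]
      simp [hh]
    · have hh' : pvIsHeader a = false := by simpa using hh
      rw [List.takeWhile_cons, List.dropWhile_cons]
      simp only [hh', Bool.not_false, if_true]
      rw [pvAGo_cons_plain_false a t hh', ih]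
      rfl

-- on a header-headed (or empty) list, A's loop equals B's section recursion, for either skip value
lemma pvAGo_eq_sections : ∀ (n : Nat) (lines : List String), lines.length ≤ n →
    (∀ h, lines.head? = some h → pvIsHeader h = true) →
    ∀ skip, pvAGo lines skip = pvSections lines := by
  intro n
  induction n with
  | zero =>
    intro lines hlen _ skip
    have : lines = [] := List.eq_nil_of_length_eq_zero (Nat.le_zero.mp hlen)
    subst this; cases skip <;> simp [pvAGo, pvSections]
  | succ n ih =>
    intro lines hlen hhd skip
    cases lines with
    | nil => cases skip <;> simp [pvAGo, pvSections]
    | cons h t =>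
      have hh : pvIsHeader h = true := hhd h rfl
      have hdrop : ∀ x, (t.dropWhile (fun l => !pvIsHeader l)).head? = some x →
          pvIsHeader x = true := by
        intro x hxh
        have hne : t.dropWhile (fun l => !pvIsHeader l) ≠ [] := by
          intro hnil; rw [hnil] at hxh; simp at hxh
        have hd := pv_head_dropWhile (fun l => !pvIsHeader l) t hne
        have hhead : (t.dropWhile (fun l => !pvIsHeader l)).head hne = x := by
          rw [List.head?_eq_some_head hne] at hxh; exact Option.some.inj hxh
        rw [hhead] at hd
        simpa using hd
      have hlen' : (t.dropWhile (fun l => !pvIsHeader l)).length ≤ n := by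
        have := List.length_dropWhile_le (fun l => !pvIsHeader l) t
        simp at hlen; omega
      have hrest := ih (t.dropWhile (fun l => !pvIsHeader l)) hlen' hdrop
      by_cases hr : pvIsRedacted h
      · rw [pvAGo_cons_red h t hr skip, pvAGo_true_drop, hrest true]
        simp [pvSections, hr]
      · have hr' : pvIsRedacted h = false := by simpa using hr
        rw [pvAGo_cons_keep h t hr' hh skip, pvAGo_false_split, hrest false]
        simp [pvSections, hr']

-- A's whole kept list equals B's preamble ++ sections
lemma pv_kept_eq (lines : List String) :
    pvAGo lines false =
      lines.takeWhile (fun l => !pvIsHeader l) ++ pvSections (lines.dropWhile (fun l => !pvIsHeader l)) := by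
  rw [pvAGo_false_split]
  congr 1
  apply pvAGo_eq_sections (lines.dropWhile (fun l => !pvIsHeader l)).length _ le_rfl
  intro x hxh
  have hne : lines.dropWhile (fun l => !pvIsHeader l) ≠ [] := by
    intro hnil; rw [hnil] at hxh; simp at hxh
  have hd := pv_head_dropWhile (fun l => !pvIsHeader l) lines hne
  have hhead : (lines.dropWhile (fun l => !pvIsHeader l)).head hne = x := by
    rw [List.head?_eq_some_head hne] at hxh; exact Option.some.inj hxh
  rw [hhead] at hd
  simpa using hd

-- ===== VERDICT (by name: the statement is the Claim_ definition above) =====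
theorem redact_methodology_py_spec : Claim_equal_redact_methodology_py := by
  intro md _
  unfold Spec_redact_methodology_py redact_methodology_py redact_methodology_py_alt
  cases md with
  | none => rfl
  | some s =>
    by_cases hs : s = ""
    · simp [hs]
    · simp only [hs, if_false]
      rw [pv_kept_eq]
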